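-- pv_equiv track=rewrite | github.com/pecalleja/python-tdd-exercises | exercises.py | get_3mer_usage_chart
-- ===== SOURCE A (Python) =====
-- def get_3mer_usage_chart(dna: str) -> list[tuple]:
--     """
--     This routine implements a 'sliding window'
--     and extracts all possible consecutive 3-mers.
--     It counts how often they appear and returns
--     a list of tuples with (name, occurrence).
--     The list is alphabetically sorted by the name
--     of the 3-mer.
--     """
--     index = 0
--     result = {}
--     while index <= len(dna) - 3:
--         mers3 = dna[index : index + 3]  # noqa
--         result[mers3] = result.get(mers3, 0) + 1
--         index += 1
--     sorted(result)
--     return sorted([(key, value) for key, value in result.items()])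
-- ===== SOURCE B (Python) =====
-- def get_3mer_usage_chart(dna: str) -> list[tuple]:
--     """Sort-and-group counting: extract all 3-mers, sort them, then emit
--     run-lengths of equal consecutive entries (no hash map, no final re-sort)."""
--     mers = sorted(dna[i : i + 3] for i in range(len(dna) - 2))
--     out = []
--     i = 0
--     n = len(mers)
--     while i < n:
--         j = i
--         while j < n and mers[j] == mers[i]:
--             j += 1
--         out.append((mers[i], j - i))
--         i = j
--     return out
-- ===== Notes on version B (the rewrite author's own statement) =====
-- stated objective: alternative
-- what changed: B replaces A's dict-based counting (hash map of 3-mer counts, then a sort of the items) by a sort-and-group strategy: it sorts the list of all extracted 3-mers and emits (mer, run-length) pairs by scanning equal consecutive entries, so no hash map is maintained and no final re-sort of pairs is needed.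
import Mathlib
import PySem

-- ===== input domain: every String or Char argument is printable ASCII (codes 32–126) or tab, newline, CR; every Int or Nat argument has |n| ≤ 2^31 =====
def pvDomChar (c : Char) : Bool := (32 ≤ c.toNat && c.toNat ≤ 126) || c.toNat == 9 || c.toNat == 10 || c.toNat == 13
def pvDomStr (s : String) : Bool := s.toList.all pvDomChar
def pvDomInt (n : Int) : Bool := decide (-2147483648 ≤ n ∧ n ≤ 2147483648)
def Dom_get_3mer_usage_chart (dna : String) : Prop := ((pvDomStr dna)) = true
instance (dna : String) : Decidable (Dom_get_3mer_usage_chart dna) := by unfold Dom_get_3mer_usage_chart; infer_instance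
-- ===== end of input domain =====

-- B counts 3-mers by sorting the extracted substring list and run-length-grouping equal
-- neighbours, instead of A's dict counting followed by a sort of the items (objective: alternative).

-- ===== PORT A =====
-- the while loop: `while index <= len(dna) - 3: result[mers3] = result.get(mers3, 0) + 1; index += 1`
def pvAloop (s : List Char) (d : PySem.Dict String Int) (index : Nat) : PySem.Dict String Int :=
  if h : (index : Int) ≤ (s.length : Int) - 3 then
    let mers3 := String.ofList (PySem.List.slice s (some (index : Int)) (some ((index : Int) + 3)))
    pvAloop s (d.insert mers3 (d.getD mers3 0 + 1)) (index + 1)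
  else d
termination_by s.length - index
decreasing_by omega

def get_3mer_usage_chart (dna : String) : List (String × Int) :=
  let result := pvAloop dna.toList PySem.Dict.empty 0
  -- A's stray `sorted(result)` computes a sorted key list and discards it: no effect on the result
  PySem.List.sorted2 (result.items.map (fun kv => (kv.1, kv.2))) (fun p => p.1) (fun p => p.2) false

-- ===== PORT B =====
-- `sorted(dna[i:i+3] for i in range(len(dna) - 2))`
def pvMers (s : List Char) : List String :=
  ((PySem.List.pyRange 0 ((s.length : Int) - 2)).map
    (fun i => String.ofList (PySem.List.slice s (some i) (some (i + 3)))))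

-- the outer `while i < n` loop; the inner `while j < n and mers[j] == mers[i]` scan of the
-- current run is the takeWhile/dropWhile split of the remaining list, `j - i` = run length + 1
def pvRuns : List String → List (String × Int)
  | [] => []
  | m :: rest =>
    let same := rest.takeWhile (fun x => x == m)
    let diff := rest.dropWhile (fun x => x == m)
    (m, (same.length : Int) + 1) :: pvRuns diff
termination_by l => l.length
decreasing_by
  simp only [List.length_cons]
  exact Nat.lt_succ_of_le (List.length_dropWhile_le _ _)

def get_3mer_usage_chart_alt (dna : String) : List (String × Int) :=
  pvRuns (PySem.List.sorted (pvMers dna.toList) (fun x => x) false)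

-- ===== PRECONDITION & SPEC =====
def Spec_get_3mer_usage_chart (dna : String) (out : List (String × Int)) : Prop := out = get_3mer_usage_chart_alt dna
instance (dna : String) (out : List (String × Int)) : Decidable (Spec_get_3mer_usage_chart dna out) := by unfold Spec_get_3mer_usage_chart; infer_instance

-- ===== CLAIM (what is proved, stated in full; the proofs are below) =====
def Claim_equal_get_3mer_usage_chart : Prop := ∀ (dna : String), Dom_get_3mer_usage_chart dna → Spec_get_3mer_usage_chart dna (get_3mer_usage_chart dna)

-- ===== LEMMAS AND PROOFS =====

-- the 3-mer starting at index i, and the list of all of them over Nat indices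
def pvMer (s : List Char) (i : Nat) : String := String.ofList ((s.drop i).take 3)

def pvMersN (s : List Char) : List String := (List.range (s.length - 2)).map (pvMer s)

lemma pvMers_eq (s : List Char) : pvMers s = pvMersN s := by
  unfold pvMers pvMersN
  rcases Nat.lt_or_ge s.length 2 with h | h
  · interval_cases hl : s.length
    · simp [PySem.List.pyRange]
    · simp [PySem.List.pyRange]
  · have h2 : (s.length : Int) - 2 = ((s.length - 2 : Nat) : Int) := by omega
    rw [h2, PySem.List.pyRange_zero_natCast, List.map_map]
    apply List.map_congr_left
    intro i _
    simp only [Function.comp, pvMer]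
    have := PySem.List.slice_natCast_add s i 3
    simp only [Nat.cast_ofNat] at this
    rw [this]

lemma pvAloop_eq (s : List Char) (d : PySem.Dict String Int) (index : Nat) :
    pvAloop s d index =
      (List.range' index (s.length - 2 - index)).foldl
        (fun d i => d.insert (pvMer s i) (d.getD (pvMer s i) 0 + 1)) d := by
  induction d, index using pvAloop.induct s with
  | case1 d index h mers3 ih =>
    have hn : s.length - 2 - index = (s.length - 2 - (index + 1)) + 1 := by omega
    rw [pvAloop, dif_pos h, hn, List.range'_succ, List.foldl_cons, ih]
    have hm : mers3 = pvMer s index := by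
      have := PySem.List.slice_natCast_add s index 3
      simp only [Nat.cast_ofNat] at this
      simp [mers3, this, pvMer]
    rw [hm]
  | case2 d index h =>
    have hn : s.length - 2 - index = 0 := by omega
    rw [pvAloop, dif_neg h, hn]
    rfl

lemma pvAloop_counter (s : List Char) :
    pvAloop s PySem.Dict.empty 0 = PySem.Dict.counter (pvMersN s) := by
  rw [pvAloop_eq, PySem.Dict.counter_eq_foldl]
  unfold pvMersN
  rw [List.foldl_map, Nat.sub_zero, ← List.range_eq_range']
  rfl

lemma pvRuns_spec (l : List String) (h : l.Pairwise (· ≤ ·)) :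
    (∀ p : String × Int, p ∈ pvRuns l ↔ p.1 ∈ l ∧ p.2 = (l.count p.1 : Int)) ∧
      (pvRuns l).Pairwise (fun a b => a.1 < b.1) := by
  induction l using pvRuns.induct with
  | case1 => simp [pvRuns]
  | case2 m rest _diffv ih =>
    simp only [] at ih
    set same := rest.takeWhile (fun x => x == m) with hsamedef
    set diff := rest.dropWhile (fun x => x == m) with hdiffdef
    have hsplit : same ++ diff = rest := List.takeWhile_append_dropWhile
    have hsame : ∀ x ∈ same, x = m := by
      intro x hx
      have h1 := List.mem_takeWhile_imp hx
      exact eq_of_beq h1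
    have hrest : rest.Pairwise (· ≤ ·) := (List.pairwise_cons.mp h).2
    have hle : ∀ x ∈ rest, m ≤ x := (List.pairwise_cons.mp h).1
    have hdiffpw : diff.Pairwise (· ≤ ·) := List.Pairwise.sublist (List.dropWhile_sublist _) hrest
    have hlt : ∀ x ∈ diff, m < x := by
      rcases hd : diff with _ | ⟨d, t⟩
      · intro x hx; simp at hx
      · have hhead := List.head?_dropWhile_not (fun x => x == m) rest
        rw [show List.dropWhile (fun x => x == m) rest = diff from hdiffdef.symm, hd] at hhead
        simp only [List.head?_cons] at hhead
        have hdm : d ≠ m := by simpa using hhead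
        have hdrest : d ∈ rest := (List.dropWhile_sublist _).mem (by rw [show List.dropWhile (fun x => x == m) rest = diff from hdiffdef.symm, hd]; exact List.mem_cons_self)
        have hmd : m < d := lt_of_le_of_ne (hle d hdrest) (Ne.symm hdm)
        intro x hx
        rcases List.mem_cons.mp hx with rfl | hxt
        · exact hmd
        · have : d ≤ x := (List.pairwise_cons.mp (hd ▸ hdiffpw)).1 x hxt
          exact lt_of_lt_of_le hmd this
    obtain ⟨ihmem, ihpw⟩ := ih hdiffpw
    have hl : m :: rest = m :: same ++ diff := by rw [← hsplit]; rfl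
    have hcount_m : (m :: rest).count m = same.length + 1 := by
      have h1 : same.count m = same.length := List.count_eq_length.mpr (fun b hb => (hsame b hb).symm)
      have h2 : diff.count m = 0 := List.count_eq_zero.mpr (fun hm => lt_irrefl m (hlt m hm))
      rw [hl]
      simp [List.count_append, h1, h2]
    have hcount_diff : ∀ k ∈ diff, (m :: rest).count k = diff.count k := by
      intro k hk
      have hkm : k ≠ m := fun e => lt_irrefl m (e ▸ hlt k hk)
      have h1 : same.count k = 0 := List.count_eq_zero.mpr (fun hm => hkm (hsame k hm))
      rw [hl]
      simp [List.count_append, h1, Ne.symm hkm]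
    have hruns : pvRuns (m :: rest) = (m, (same.length : Int) + 1) :: pvRuns diff := by
      rw [pvRuns]
    constructor
    · intro p
      rw [hruns, List.mem_cons, ihmem]
      constructor
      · rintro (rfl | ⟨h1, h2⟩)
        · refine ⟨List.mem_cons_self, ?_⟩
          rw [hcount_m]; push_cast; ring
        · refine ⟨?_, ?_⟩
          · rw [← hsplit]; exact List.mem_cons_of_mem _ (List.mem_append_right _ h1)
          · rw [hcount_diff p.1 h1]; exact h2
      · rintro ⟨h1, h2⟩
        by_cases hpm : p.1 = m
        · left
          have : p.2 = (same.length : Int) + 1 := by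
            rw [h2, hpm, hcount_m]; push_cast; ring
          exact Prod.ext hpm this
        · right
          rcases List.mem_cons.mp h1 with e | hrest'
          · exact absurd e hpm
          · have hdiffmem : p.1 ∈ diff := by
              rcases List.mem_append.mp (hsplit ▸ hrest') with hs | hd
              · exact absurd (hsame _ hs) hpm
              · exact hd
            exact ⟨hdiffmem, by rw [← hcount_diff p.1 hdiffmem]; exact h2⟩
    · rw [hruns]
      refine List.pairwise_cons.mpr ⟨?_, ihpw⟩
      intro q hq
      exact hlt q.1 ((ihmem q).mp hq).1

lemma insertBy_congr {α : Type} (f g : α → α → Bool) (x : α) (ys : List α)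
    (h : ∀ b ∈ ys, f x b = g x b) :
    PySem.List.insertBy f x ys = PySem.List.insertBy g x ys := by
  induction ys with
  | nil => rfl
  | cons y ys ih =>
    rw [PySem.List.insertBy, PySem.List.insertBy, h y List.mem_cons_self]
    split
    · rfl
    · rw [ih (fun b hb => h b (List.mem_cons_of_mem _ hb))]

lemma foldl_insertBy_congr {α : Type} (f g : α → α → Bool) (xs : List α) (acc : List α)
    (h : ∀ a b, (a ∈ xs ∨ a ∈ acc) → (b ∈ xs ∨ b ∈ acc) → f a b = g a b) :
    xs.foldl (fun acc x => PySem.List.insertBy f x acc) acc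
      = xs.foldl (fun acc x => PySem.List.insertBy g x acc) acc := by
  induction xs generalizing acc with
  | nil => rfl
  | cons x xs ih =>
    rw [List.foldl_cons, List.foldl_cons,
      insertBy_congr f g x acc (fun b hb => h x b (Or.inl List.mem_cons_self) (Or.inr hb))]
    apply ih
    intro a b ha hb
    apply h a b
    · rcases ha with ha | ha
      · exact Or.inl (List.mem_cons_of_mem _ ha)
      · rcases (PySem.List.mem_insertBy g x a acc).mp ha with rfl | ha
        · exact Or.inl List.mem_cons_self
        · exact Or.inr ha
    · rcases hb with hb | hb
      · exact Or.inl (List.mem_cons_of_mem _ hb)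
      · rcases (PySem.List.mem_insertBy g x b acc).mp hb with rfl | hb
        · exact Or.inl List.mem_cons_self
        · exact Or.inr hb

lemma sorted2_eq_sorted_fst (xs : List (String × Int)) (hnd : (xs.map Prod.fst).Nodup) :
    PySem.List.sorted2 xs (fun p => p.1) (fun p => p.2) false
      = PySem.List.sorted xs (fun p => p.1) false := by
  rw [PySem.List.sorted2, PySem.List.sorted]
  simp only [if_neg (by decide : ¬ (false = true))]
  apply foldl_insertBy_congr
  intro a b ha hb
  rcases ha with ha | ha; swap; · simp at ha
  rcases hb with hb | hb; swap; · simp at hb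
  have hinj : a.1 = b.1 → a = b := by
    intro e
    exact List.inj_on_of_nodup_map hnd ha hb e
  by_cases h1 : a.1 < b.1
  · simp [h1]
  · by_cases h2 : b.1 < a.1
    · simp [h1, h2]
    · have : a = b := hinj (le_antisymm (not_lt.mp h2) (not_lt.mp h1))
      subst this
      simp

-- ===== VERDICT (by name: the statement is the Claim_ definition above) =====
theorem get_3mer_usage_chart_spec : Claim_equal_get_3mer_usage_chart := by
  intro dna _
  unfold Spec_get_3mer_usage_chart get_3mer_usage_chart get_3mer_usage_chart_alt
  rw [pvMers_eq, pvAloop_counter]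
  show PySem.List.sorted2 ((PySem.Dict.counter (pvMersN dna.toList)).items.map
      (fun kv => (kv.1, kv.2))) (fun p => p.1) (fun p => p.2) false
    = pvRuns (PySem.List.sorted (pvMersN dna.toList) (fun x => x) false)
  generalize pvMersN dna.toList = ms
  have hitems : (PySem.Dict.counter ms).items
      = (PySem.Set.ofList ms).map (fun k => (k, (ms.count k : Int))) :=
    PySem.Dict.items_counter ms
  have hid : ((PySem.Dict.counter ms).items.map (fun kv => (kv.1, kv.2)))
      = (PySem.Dict.counter ms).items := by
    simp
  rw [hid, hitems]
  -- the sorted 3-mer list is pairwise ≤, so pvRuns_spec applies to it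
  have hsortedpw : (PySem.List.sorted ms (fun x => x) false).Pairwise (· ≤ ·) :=
    PySem.List.sorted_pairwise ms (fun x => x)
  obtain ⟨hmem, hpw⟩ := pvRuns_spec _ hsortedpw
  -- sorting the items of the counter by the tuple key equals sorting by the fst key (keys are distinct)
  have hndkeys : (((PySem.Set.ofList ms).map (fun k => (k, (ms.count k : Int)))).map Prod.fst).Nodup := by
    rw [List.map_map]
    have he : (Prod.fst ∘ fun k : String => (k, (ms.count k : Int))) = fun k => k := rfl
    rw [he, List.map_id']
    exact PySem.Set.nodup_ofList ms
  rw [sorted2_eq_sorted_fst _ hndkeys]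
  -- the run-length list is a strictly fst-increasing rearrangement of the counter's items
  apply PySem.List.sorted_eq_of_perm_of_pairwise_lt _ _ (fun p : String × Int => p.1) _ hpw
  have hndruns : (pvRuns (PySem.List.sorted ms (fun x => x) false)).Nodup :=
    hpw.imp (fun hab => fun e => absurd (congrArg Prod.fst e) (ne_of_lt hab))
  have hnditems : ((PySem.Set.ofList ms).map (fun k => (k, (ms.count k : Int)))).Nodup :=
    (PySem.Set.nodup_ofList ms).map (fun a b e => congrArg Prod.fst e)
  rw [List.perm_ext_iff_of_nodup hndruns hnditems]
  intro p
  rw [hmem p, List.mem_map]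
  constructor
  · rintro ⟨h1, h2⟩
    refine ⟨p.1, ?_, ?_⟩
    · rw [PySem.Set.mem_ofList]
      exact (PySem.List.mem_sorted ms _ false p.1).mp h1
    · have hc : (PySem.List.sorted ms (fun x => x) false).count p.1 = ms.count p.1 :=
        (PySem.List.sorted_perm ms (fun x => x) false).count_eq p.1
      rw [hc] at h2
      exact Prod.ext rfl h2.symm
  · rintro ⟨k, hk, rfl⟩
    constructor
    · rw [PySem.List.mem_sorted]
      exact (PySem.Set.mem_ofList ms k).mp hk
    · show ((List.count k ms : Nat) : Int) = ((PySem.List.sorted ms (fun x => x) false).count k : Nat)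
      exact congrArg Nat.cast ((PySem.List.sorted_perm ms (fun x => x) false).count_eq k).symm
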